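-- pv_equiv track=rewrite | github.com/upperdim/minishell-devtools | parser_prot.py | validate_quotes
-- ===== SOURCE A (Python) =====
-- def validate_quotes(line):
-- 	'''Checks whether single and double quotes were closed correctly or not'''
-- 	quote_type = None
-- 	for c in line:
-- 		if quote_type is None and (c == '"' or c == "'"):
-- 			quote_type = c
-- 		elif quote_type == c:
-- 			quote_type = None
-- 	return quote_type is None
-- ===== SOURCE B (Python) =====
-- def validate_quotes(line):
--     '''Checks whether single and double quotes were closed correctly or not'''
--     i = 0
--     n = len(line)
--     while i < n:
--         c = line[i]
--         if c == '"' or c == "'":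
--             j = line.find(c, i + 1)
--             if j == -1:
--                 return False
--             i = j + 1
--         else:
--             i += 1
--     return True
-- ===== Notes on version B (the rewrite author's own statement) =====
-- stated objective: alternative
-- what changed: Replaces the per-character open-quote state machine with an index-jumping scan that, on each opening quote, uses str.find to leap directly to the matching quote (or returns False if absent).
import Mathlib
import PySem

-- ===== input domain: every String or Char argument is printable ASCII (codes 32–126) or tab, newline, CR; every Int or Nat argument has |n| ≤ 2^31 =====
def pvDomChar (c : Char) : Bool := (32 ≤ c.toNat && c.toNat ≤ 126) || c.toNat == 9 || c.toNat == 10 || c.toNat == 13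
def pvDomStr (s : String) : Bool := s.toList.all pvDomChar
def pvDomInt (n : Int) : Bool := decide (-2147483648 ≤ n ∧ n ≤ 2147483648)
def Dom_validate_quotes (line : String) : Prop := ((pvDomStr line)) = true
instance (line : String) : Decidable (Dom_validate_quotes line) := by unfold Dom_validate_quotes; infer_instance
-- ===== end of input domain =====

-- B replaces A's per-character open-quote state machine by an index-jumping scan that leaps
-- over each quoted body searching for the quote that opened it (objective: alternative).

-- ===== PORT A =====
-- the for-loop's body, folded over the characters with quote_type as state
def vqStep (st : Option Char) (c : Char) : Option Char :=
  if st = none ∧ (c = '"' ∨ c = '\'') then some c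
  else if st = some c then none
  else st

def validate_quotes (line : String) : Bool :=
  (line.toList.foldl vqStep none).isNone

-- ===== PORT B =====
-- line.find(c, i+1) followed by i = j+1: skip returns the suffix after the first occurrence of q
def vqSkip (q : Char) : List Char → Option (List Char)
  | [] => none
  | c :: rest => if c = q then some rest else vqSkip q rest

theorem vqSkip_length {q : Char} : ∀ {l r : List Char}, vqSkip q l = some r → r.length < l.length
  | c :: rest, r, h => by
    by_cases hc : c = q
    · simp [vqSkip, hc] at h; simp [← h]
    · have := vqSkip_length (q := q) (l := rest) (r := r) (by simpa [vqSkip, hc] using h)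
      simp [List.length_cons]; omega

def vqScan : List Char → Bool
  | [] => true
  | c :: rest =>
    if c = '"' ∨ c = '\'' then
      match h : vqSkip c rest with
      | none => false
      | some rest' => vqScan rest'
    else vqScan rest
termination_by l => l.length
decreasing_by
  · exact Nat.lt_trans (vqSkip_length h) (by simp)
  · simp

def validate_quotes_alt (line : String) : Bool := vqScan line.toList

-- ===== PRECONDITION & SPEC =====
def Spec_validate_quotes (line : String) (out : Bool) : Prop := out = validate_quotes_alt line
instance (line : String) (out : Bool) : Decidable (Spec_validate_quotes line out) := by unfold Spec_validate_quotes; infer_instance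

-- ===== CLAIM (what is proved, stated in full; the proofs are below) =====
def Claim_equal_validate_quotes : Prop := ∀ (line : String), Dom_validate_quotes line → Spec_validate_quotes line (validate_quotes line)

-- ===== LEMMAS AND PROOFS =====

-- with an open quote q, A ignores everything until the next q, which closes it
theorem foldl_vqStep_some (q : Char) : ∀ (l : List Char),
    l.foldl vqStep (some q) =
      (match vqSkip q l with
       | none => some q
       | some r => r.foldl vqStep none)
  | [] => rfl
  | c :: rest => by
    by_cases hc : c = q
    · simp [vqSkip, hc, vqStep]
    · have hstep : vqStep (some q) c = some q := by
        simp [vqStep, Ne.symm hc]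
      have hskip : vqSkip q (c :: rest) = vqSkip q rest := by simp [vqSkip, hc]
      rw [List.foldl_cons, hstep, hskip]
      exact foldl_vqStep_some q rest

theorem foldl_vqStep_eq_vqScan : ∀ (l : List Char),
    (l.foldl vqStep none).isNone = vqScan l
  | [] => by simp [vqScan]
  | c :: rest => by
    by_cases hq : c = '"' ∨ c = '\''
    · have hstep : vqStep none c = some c := by simp [vqStep, hq]
      rw [List.foldl_cons, hstep, foldl_vqStep_some c rest]
      match h : vqSkip c rest with
      | none => simp only [vqScan, if_pos hq]; split <;> simp_all
      | some r =>
        have ih := foldl_vqStep_eq_vqScan r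
        simp only [vqScan, if_pos hq]
        split <;> simp_all
    · have hstep : vqStep none c = none := by simp [vqStep, hq]
      rw [List.foldl_cons, hstep, foldl_vqStep_eq_vqScan rest]
      simp [vqScan, hq]
termination_by l => l.length
decreasing_by
  all_goals first
    | exact Nat.lt_trans (vqSkip_length h) (by simp)
    | simp

-- ===== VERDICT (by name: the statement is the Claim_ definition above) =====
theorem validate_quotes_spec : Claim_equal_validate_quotes := by
  intro line _
  unfold Spec_validate_quotes validate_quotes validate_quotes_alt
  exact foldl_vqStep_eq_vqScan line.toList
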